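-- pv_equiv track=rewrite | github.com/fantoosh/IBM-Data-science-Note | xor_sum.py | xor_em
-- ===== SOURCE A (Python) =====
-- def xor_em(lst):
--     n = len(lst)
--     output = 0
--     for i, element in enumerate(lst):
--         count = (i + 1) * (n - i)
--         if count % 2:
--             output ^= element
--     return output
-- ===== SOURCE B (Python) =====
-- def xor_em(lst):
--     # (i+1)*(len-i) is odd iff len is odd and i is even, so:
--     if len(lst) % 2 == 0:
--         return 0
--     acc = 0
--     i = 0
--     while i < len(lst):
--         acc ^= lst[i]
--         i += 2
--     return acc
-- ===== Notes on version B (the rewrite author's own statement) =====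
-- stated objective: simpler
-- what changed: Replaces the per-element count (i+1)*(n-i) and parity test with a single length-parity guard (return 0 for even-length lists) plus a stride-2 walk that XORs only even-index elements.
import Mathlib
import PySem

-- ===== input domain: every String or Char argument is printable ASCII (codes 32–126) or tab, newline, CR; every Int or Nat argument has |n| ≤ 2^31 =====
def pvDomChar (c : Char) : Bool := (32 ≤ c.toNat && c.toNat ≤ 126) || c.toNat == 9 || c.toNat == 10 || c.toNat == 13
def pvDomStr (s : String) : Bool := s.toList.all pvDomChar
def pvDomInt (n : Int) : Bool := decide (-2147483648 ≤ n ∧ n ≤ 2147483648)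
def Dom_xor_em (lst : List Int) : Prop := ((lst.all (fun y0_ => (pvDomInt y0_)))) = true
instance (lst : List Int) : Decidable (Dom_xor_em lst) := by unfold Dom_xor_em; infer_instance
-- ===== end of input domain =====

-- B replaces A's per-element count (i+1)*(n-i) parity test with a length-parity guard
-- plus a stride-2 XOR walk over the even-index elements (simpler; same result).

-- ===== PORT A =====
def xor_em (lst : List Int) : Int :=
  let n : Int := lst.length
  (PySem.List.enumerate lst 0).foldl
    (fun output p =>
      let count := (p.1 + 1) * (n - p.1)
      if PySem.Int.mod count 2 ≠ 0 then PySem.Int.bxor output p.2 else output)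
    0

-- ===== PORT B =====
-- the 'while i < len(lst): acc ^= lst[i]; i += 2' loop of Source B (lst[i] is in range there)
def xorIdxLoop (lst : List Int) (acc : Int) (i : Nat) : Int :=
  if h : i < lst.length then
    xorIdxLoop lst (PySem.Int.bxor acc lst[i]) (i + 2)
  else acc
termination_by lst.length - i

def xor_em_alt (lst : List Int) : Int :=
  if PySem.Int.mod (lst.length : Int) 2 == 0 then 0
  else xorIdxLoop lst 0 0

-- ===== PRECONDITION & SPEC =====
def Spec_xor_em (lst : List Int) (out : Int) : Prop := out = xor_em_alt lst
instance (lst : List Int) (out : Int) : Decidable (Spec_xor_em lst out) := by unfold Spec_xor_em; infer_instance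

-- ===== CLAIM (what is proved, stated in full; the proofs are below) =====
def Claim_equal_xor_em : Prop := ∀ (lst : List Int), Dom_xor_em lst → Spec_xor_em lst (xor_em lst)

-- ===== LEMMAS AND PROOFS =====

-- A's loop body, with the list length n fixed
def aStep (n : Int) (output : Int) (p : Int × Int) : Int :=
  let count := (p.1 + 1) * (n - p.1)
  if PySem.Int.mod count 2 ≠ 0 then PySem.Int.bxor output p.2 else output

lemma modTwo (a : Int) : PySem.Int.mod a 2 = a % 2 :=
  PySem.Int.mod_eq_emod_of_pos (by norm_num)

lemma cond_even (n s : Int) (hn : n % 2 = 0) : ((s + 1) * (n - s)) % 2 = 0 := by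
  have h : (s + 1) % 2 = 0 ∨ (n - s) % 2 = 0 := by omega
  rcases h with h | h <;> rw [Int.mul_emod, h] <;> simp

lemma cond_odd (n s : Int) (hn : n % 2 = 1) (hs : s % 2 = 0) :
    ((s + 1) * (n - s)) % 2 = 1 := by
  have h1 : (s + 1) % 2 = 1 := by omega
  have h2 : (n - s) % 2 = 1 := by omega
  rw [Int.mul_emod, h1, h2]; decide

lemma cond_odd' (n s : Int) (hn : n % 2 = 1) (hs : s % 2 = 1) :
    ((s + 1) * (n - s)) % 2 = 0 := by
  have h1 : (s + 1) % 2 = 0 := by omega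
  rw [Int.mul_emod, h1]; simp

-- proof-side view of B's loop: stride-2 XOR over the remaining list
def xorStride2 (acc : Int) : List Int → Int
  | [] => acc
  | [x] => PySem.Int.bxor acc x
  | x :: _ :: xs => xorStride2 (PySem.Int.bxor acc x) xs

-- B's index loop computes the stride-2 XOR of the dropped suffix
lemma xorIdxLoop_eq_stride (lst : List Int) (i : Nat) (acc : Int) :
    xorIdxLoop lst acc i = xorStride2 acc (lst.drop i) := by
  fun_induction xorIdxLoop lst acc i with
  | case1 acc i h ih =>
    rw [ih, List.drop_eq_getElem_cons h]
    by_cases h1 : i + 1 < lst.length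
    · rw [List.drop_eq_getElem_cons h1]
      rfl
    · rw [show lst.drop (i + 2) = [] from List.drop_eq_nil_of_le (by omega),
          show lst.drop (i + 1) = [] from List.drop_eq_nil_of_le (by omega)]
      rfl
  | case2 acc i h =>
    rw [List.drop_eq_nil_of_le (by omega)]
    rfl

-- when n is even, A's condition never fires
lemma fold_even (n : Int) (hn : n % 2 = 0) :
    ∀ (xs : List Int) (s acc : Int),
      (PySem.List.enumerate xs s).foldl (aStep n) acc = acc := by
  intro xs
  induction xs with
  | nil => intro s acc; simp [PySem.List.enumerate_nil]
  | cons x xs ih =>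
    intro s acc
    rw [PySem.List.enumerate_cons]
    simp only [List.foldl_cons, aStep, modTwo]
    rw [if_neg (by simp [cond_even n s hn])]
    exact ih (s + 1) acc

-- when n is odd, A's condition fires exactly at even indices: the fold is B's stride-2 loop
lemma fold_odd (n : Int) (hn : n % 2 = 1) :
    ∀ (xs : List Int) (s acc : Int), s % 2 = 0 →
      (PySem.List.enumerate xs s).foldl (aStep n) acc = xorStride2 acc xs
  | [], s, acc, _ => by simp [PySem.List.enumerate_nil, xorStride2]
  | [x], s, acc, hs => by
    rw [PySem.List.enumerate_cons, PySem.List.enumerate_nil]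
    simp only [List.foldl_cons, List.foldl_nil, aStep, modTwo]
    rw [if_pos (by simp [cond_odd n s hn hs])]
    rfl
  | x :: y :: xs, s, acc, hs => by
    rw [PySem.List.enumerate_cons, PySem.List.enumerate_cons]
    simp only [List.foldl_cons, aStep, modTwo]
    rw [if_neg (by simp [cond_odd' n (s + 1) hn (by omega)]),
        if_pos (by simp [cond_odd n s hn hs])]
    have ih := fold_odd n hn xs (s + 2) (PySem.Int.bxor acc x) (by omega)
    rw [show s + 1 + 1 = s + 2 from by ring]
    exact ih

-- ===== VERDICT (by name: the statement is the Claim_ definition above) =====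
theorem xor_em_spec : Claim_equal_xor_em := by
  intro lst _
  unfold Spec_xor_em xor_em xor_em_alt
  by_cases h : ((lst.length : Int)) % 2 = 0
  · have hb : (PySem.Int.mod (lst.length : Int) 2 == 0) = true := by
      rw [modTwo]; simpa using h
    simp only [hb, if_true]
    exact fold_even _ h lst 0 0
  · have hodd : ((lst.length : Int)) % 2 = 1 := by omega
    have hb : (PySem.Int.mod (lst.length : Int) 2 == 0) = false := by
      rw [modTwo]; simpa using h
    simp only [hb, Bool.false_eq_true, if_false]
    rw [xorIdxLoop_eq_stride lst 0 0, List.drop_zero]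
    exact fold_odd _ hodd lst 0 0 rfl
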